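-- pv_equiv track=rewrite | github.com/zhulu/traffic_learn | scripts/build_app_label.py | classify_flow
-- ===== SOURCE A (Python) =====
-- EXPLICIT_APP_RULES = [
--     ("Email", {"SMTP", "SMTPS", "POP3", "POP3S", "IMAP", "IMAPS"}),
--     ("P2P", {"BitTorrent", "LSD", "NAT-PMP"}),
--     ("VoIP", {"STUN", "DTLS", "DTLSv1.0", "RTCP", "SIP"}),
--     ("File Transfer", {"SSH", "SSHv2", "FTP"}),
--     ("Chat", {"XMPP/XML"}),
--     ("Streaming", {"RTMP"}),
-- ]
--
-- EXCLUDED_PROTOCOLS = {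
--     "? KNXnet/IP",
--     "BJNP",
--     "Chargen",
--     "DB-LSP-DISC/JSON",
--     "DCERPC",
--     "DCP-AF",
--     "DCP-PFT",
--     "DHCP",
--     "DNS",
--     "ENIP",
--     "Elasticsearch",
--     "ICMP",
--     "ICMPv6",
--     "IEEE 802.15.4",
--     "IPv6",
--     "LANMAN",
--     "LLMNR",
--     "MDNS",
--     "NBNS",
--     "NBSS",
--     "NTP",
--     "NXP 802.15.4 SNIFFER",
--     "OCSP",
--     "Pathport",
--     "R-GOOSE",
--     "SMB",
--     "SMB2",
--     "SNMP",
--     "SPOOLSS",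
--     "SRVLOC",
--     "SSDP",
--     "THRIFT",
--     "VNC",
--     "WireGuard",
--     "X11",
-- }
--
-- def classify_by_filename(stem: str):
--     name = stem.lower()
--
--     if "bittorrent" in name or "torrent" in name:
--         return "P2P"
--     if "email" in name:
--         return "Email"
--     if any(token in name for token in ["scp", "sftp", "ftps", "file"]):
--         return "File Transfer"
--     if "voipbuster" in name or "audio" in name:
--         return "VoIP"
--     if any(token in name for token in ["chat", "aim", "icq", "gmailchat"]):
--         return "Chat"
--     if any(token in name for token in ["video", "netflix", "youtube", "vimeo", "spotify"]):
--         return "Streaming"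
--     if any(token in name for token in ["firefox", "chrome", "browser", "web"]):
--         return "Web Browsing"
--
--     return None
--
-- def classify_flow(apps, stem):
--     filtered_apps = [app for app in apps if app not in EXCLUDED_PROTOCOLS]
--     if not filtered_apps:
--         return None
--
--     app_set = set(filtered_apps)
--     matched_labels = [
--         label for label, protocols in EXPLICIT_APP_RULES if app_set & protocols
--     ]
--
--     # App-first only when the flow can be mapped clearly to a single class.
--     if len(matched_labels) == 1:
--         return matched_labels[0]
--
--     # If app evidence is weak or conflicting, fall back to the pcap filename.
--     return classify_by_filename(stem)
-- ===== SOURCE B (Python) =====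
-- EXPLICIT_APP_RULES = [
--     ("Email", {"SMTP", "SMTPS", "POP3", "POP3S", "IMAP", "IMAPS"}),
--     ("P2P", {"BitTorrent", "LSD", "NAT-PMP"}),
--     ("VoIP", {"STUN", "DTLS", "DTLSv1.0", "RTCP", "SIP"}),
--     ("File Transfer", {"SSH", "SSHv2", "FTP"}),
--     ("Chat", {"XMPP/XML"}),
--     ("Streaming", {"RTMP"}),
-- ]
--
-- EXCLUDED_PROTOCOLS = {
--     "? KNXnet/IP", "BJNP", "Chargen", "DB-LSP-DISC/JSON", "DCERPC", "DCP-AF",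
--     "DCP-PFT", "DHCP", "DNS", "ENIP", "Elasticsearch", "ICMP", "ICMPv6",
--     "IEEE 802.15.4", "IPv6", "LANMAN", "LLMNR", "MDNS", "NBNS", "NBSS", "NTP",
--     "NXP 802.15.4 SNIFFER", "OCSP", "Pathport", "R-GOOSE", "SMB", "SMB2",
--     "SNMP", "SPOOLSS", "SRVLOC", "SSDP", "THRIFT", "VNC", "WireGuard", "X11",
-- }
--
-- # Reverse index: protocol -> category label (protocols are disjoint across rules).
-- PROTO_TO_LABEL = {
--     proto: label for label, protocols in EXPLICIT_APP_RULES for proto in protocols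
-- }
--
-- # The early-return chain flattened to (token, label) pairs; the first category with
-- # any matching token is exactly the category of the first matching token here.
-- FILENAME_TOKEN_LABELS = [
--     ("bittorrent", "P2P"), ("torrent", "P2P"),
--     ("email", "Email"),
--     ("scp", "File Transfer"), ("sftp", "File Transfer"),
--     ("ftps", "File Transfer"), ("file", "File Transfer"),
--     ("voipbuster", "VoIP"), ("audio", "VoIP"),
--     ("chat", "Chat"), ("aim", "Chat"), ("icq", "Chat"), ("gmailchat", "Chat"),
--     ("video", "Streaming"), ("netflix", "Streaming"), ("youtube", "Streaming"),
--     ("vimeo", "Streaming"), ("spotify", "Streaming"),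
--     ("firefox", "Web Browsing"), ("chrome", "Web Browsing"),
--     ("browser", "Web Browsing"), ("web", "Web Browsing"),
-- ]
--
--
-- def classify_by_filename(stem):
--     name = stem.lower()
--     return next((label for token, label in FILENAME_TOKEN_LABELS if token in name), None)
--
--
-- def classify_flow(apps, stem):
--     # One fused pass: no filtered list, no set, no scan over the rule table.
--     kept = False
--     label = None
--     conflict = False
--     for app in apps:
--         if app in EXCLUDED_PROTOCOLS:
--             continue
--         kept = True
--         hit = PROTO_TO_LABEL.get(app)
--         if hit is not None:
--             if label is None:
--                 label = hit
--             elif hit != label: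
--                 conflict = True
--     if not kept:
--         return None
--     if label is not None and not conflict:
--         return label
--     return classify_by_filename(stem)
-- ===== Notes on version B (the rewrite author's own statement) =====
-- stated objective: alternative
-- what changed: B fuses A's three staged passes (build a filtered list, build a set, scan the rule table with set intersections) into a single loop over apps that maintains a scalar state machine (kept flag, first matched label, conflict flag) via a flattened protocol-to-label index, and replaces the filename early-return if-chain by a first-match scan over flattened (token, label) pairs.
import Mathlib
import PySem

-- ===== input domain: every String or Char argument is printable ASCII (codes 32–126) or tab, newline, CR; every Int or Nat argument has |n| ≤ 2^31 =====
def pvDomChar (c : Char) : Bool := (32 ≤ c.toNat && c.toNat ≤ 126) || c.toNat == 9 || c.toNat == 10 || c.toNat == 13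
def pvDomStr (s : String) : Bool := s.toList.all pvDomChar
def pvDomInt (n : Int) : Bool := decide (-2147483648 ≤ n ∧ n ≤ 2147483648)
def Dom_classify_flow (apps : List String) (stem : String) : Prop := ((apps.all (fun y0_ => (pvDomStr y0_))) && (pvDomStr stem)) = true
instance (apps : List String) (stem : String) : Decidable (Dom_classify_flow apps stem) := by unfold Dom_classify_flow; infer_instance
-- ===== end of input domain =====

-- B fuses A's three passes (filter, set-build, rule-table scan) into one loop over apps
-- holding a scalar state machine (kept flag, first label, conflict flag) driven by a
-- flattened protocol→label index, and flattens the filename if-chain to a first-match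
-- scan over (token, label) pairs (alternative decomposition, same cost).

-- ===== PORT A =====
def EXPLICIT_APP_RULES : List (String × List String) := [
  ("Email", ["SMTP", "SMTPS", "POP3", "POP3S", "IMAP", "IMAPS"]),
  ("P2P", ["BitTorrent", "LSD", "NAT-PMP"]),
  ("VoIP", ["STUN", "DTLS", "DTLSv1.0", "RTCP", "SIP"]),
  ("File Transfer", ["SSH", "SSHv2", "FTP"]),
  ("Chat", ["XMPP/XML"]),
  ("Streaming", ["RTMP"])]

def EXCLUDED_PROTOCOLS : List String := ["? KNXnet/IP", "BJNP", "Chargen",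
  "DB-LSP-DISC/JSON", "DCERPC", "DCP-AF", "DCP-PFT", "DHCP", "DNS", "ENIP",
  "Elasticsearch", "ICMP", "ICMPv6", "IEEE 802.15.4", "IPv6", "LANMAN", "LLMNR",
  "MDNS", "NBNS", "NBSS", "NTP", "NXP 802.15.4 SNIFFER", "OCSP", "Pathport",
  "R-GOOSE", "SMB", "SMB2", "SNMP", "SPOOLSS", "SRVLOC", "SSDP", "THRIFT",
  "VNC", "WireGuard", "X11"]

def classify_by_filename (stem : String) : Option String :=
  let name := PySem.Str.lower stem
  if PySem.Str.isIn "bittorrent" name || PySem.Str.isIn "torrent" name then some "P2P"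
  else if PySem.Str.isIn "email" name then some "Email"
  else if ["scp", "sftp", "ftps", "file"].any (fun t => PySem.Str.isIn t name) then some "File Transfer"
  else if PySem.Str.isIn "voipbuster" name || PySem.Str.isIn "audio" name then some "VoIP"
  else if ["chat", "aim", "icq", "gmailchat"].any (fun t => PySem.Str.isIn t name) then some "Chat"
  else if ["video", "netflix", "youtube", "vimeo", "spotify"].any (fun t => PySem.Str.isIn t name) then some "Streaming"
  else if ["firefox", "chrome", "browser", "web"].any (fun t => PySem.Str.isIn t name) then some "Web Browsing"
  else none

def classify_flow (apps : List String) (stem : String) : Option String :=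
  let filtered_apps := apps.filter (fun app => !(EXCLUDED_PROTOCOLS.contains app))
  if filtered_apps.isEmpty then none
  else
    let app_set : PySem.Set String := PySem.Set.ofList filtered_apps
    let matched_labels :=
      (EXPLICIT_APP_RULES.filter (fun r => !(PySem.Set.inter app_set r.2).isEmpty)).map Prod.fst
    if matched_labels.length == 1 then PySem.List.pyGet? matched_labels 0
    else classify_by_filename stem

-- ===== PORT B =====
def PROTO_TO_LABEL : PySem.Dict String String :=
  EXPLICIT_APP_RULES.foldl (fun d r => r.2.foldl (fun d p => d.insert p r.1) d) PySem.Dict.empty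

def FILENAME_TOKEN_LABELS : List (String × String) := [
  ("bittorrent", "P2P"), ("torrent", "P2P"),
  ("email", "Email"),
  ("scp", "File Transfer"), ("sftp", "File Transfer"),
  ("ftps", "File Transfer"), ("file", "File Transfer"),
  ("voipbuster", "VoIP"), ("audio", "VoIP"),
  ("chat", "Chat"), ("aim", "Chat"), ("icq", "Chat"), ("gmailchat", "Chat"),
  ("video", "Streaming"), ("netflix", "Streaming"), ("youtube", "Streaming"),
  ("vimeo", "Streaming"), ("spotify", "Streaming"),
  ("firefox", "Web Browsing"), ("chrome", "Web Browsing"),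
  ("browser", "Web Browsing"), ("web", "Web Browsing")]

def classify_by_filename_alt (stem : String) : Option String :=
  let name := PySem.Str.lower stem
  (FILENAME_TOKEN_LABELS.find? (fun p => PySem.Str.isIn p.1 name)).map Prod.snd

-- one loop iteration of B's state machine: (kept, first label, conflict)
def cfStep (s : Bool × Option String × Bool) (app : String) : Bool × Option String × Bool :=
  if EXCLUDED_PROTOCOLS.contains app then s
  else
    match PROTO_TO_LABEL.get? app with
    | none => (true, s.2.1, s.2.2)
    | some hit =>
      match s.2.1 with
      | none => (true, some hit, s.2.2)
      | some l => (true, some l, s.2.2 || (hit != l))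

def classify_flow_alt (apps : List String) (stem : String) : Option String :=
  let st := apps.foldl cfStep (false, none, false)
  if !st.1 then none
  else
    match st.2.1 with
    | some l => if !st.2.2 then some l else classify_by_filename_alt stem
    | none => classify_by_filename_alt stem

-- ===== PRECONDITION & SPEC =====
def Spec_classify_flow (apps : List String) (stem : String) (out : Option String) : Prop := out = classify_flow_alt apps stem
instance (apps : List String) (stem : String) (out : Option String) : Decidable (Spec_classify_flow apps stem out) := by unfold Spec_classify_flow; infer_instance

-- ===== CLAIM (what is proved, stated in full; the proofs are below) =====
def Claim_equal_classify_flow : Prop := ∀ (apps : List String) (stem : String), Dom_classify_flow apps stem → Spec_classify_flow apps stem (classify_flow apps stem)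

-- ===== LEMMAS AND PROOFS =====
theorem byname_eq (stem : String) : classify_by_filename stem = classify_by_filename_alt stem := by
  unfold classify_by_filename classify_by_filename_alt FILENAME_TOKEN_LABELS
  simp only [List.find?, List.any_cons, List.any_nil, Bool.or_false]
  repeat' split <;> simp_all

def ALL_PROTOCOLS : List String := ["SMTP", "SMTPS", "POP3", "POP3S", "IMAP", "IMAPS",
  "BitTorrent", "LSD", "NAT-PMP", "STUN", "DTLS", "DTLSv1.0", "RTCP", "SIP",
  "SSH", "SSHv2", "FTP", "XMPP/XML", "RTMP"]

set_option maxHeartbeats 1000000 in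
theorem get?_proto (a l : String) :
    PROTO_TO_LABEL.get? a = some l ↔ ∃ r ∈ EXPLICIT_APP_RULES, a ∈ r.2 ∧ l = r.1 := by
  by_cases hmem : a ∈ ALL_PROTOCOLS
  · simp only [ALL_PROTOCOLS, List.mem_cons, List.not_mem_nil, or_false] at hmem
    rcases hmem with rfl|rfl|rfl|rfl|rfl|rfl|rfl|rfl|rfl|rfl|rfl|rfl|rfl|rfl|rfl|rfl|rfl|rfl|rfl <;>
      simp [EXPLICIT_APP_RULES, show PROTO_TO_LABEL = PySem.Dict.mk [("SMTP", "Email"), ("SMTPS", "Email"),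
      ("POP3", "Email"), ("POP3S", "Email"), ("IMAP", "Email"), ("IMAPS", "Email"),
      ("BitTorrent", "P2P"), ("LSD", "P2P"), ("NAT-PMP", "P2P"), ("STUN", "VoIP"),
      ("DTLS", "VoIP"), ("DTLSv1.0", "VoIP"), ("RTCP", "VoIP"), ("SIP", "VoIP"),
      ("SSH", "File Transfer"), ("SSHv2", "File Transfer"), ("FTP", "File Transfer"),
      ("XMPP/XML", "Chat"), ("RTMP", "Streaming")] from rfl, PySem.Dict.get?_mk_cons, eq_comm]
  · have hnone : PROTO_TO_LABEL.get? a = none := by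
      rw [PySem.Dict.get?_eq_none_iff_not_mem_keys]
      have hkeys : PROTO_TO_LABEL.keys = ALL_PROTOCOLS := by rfl
      rw [hkeys]; exact hmem
    rw [hnone]
    constructor
    · intro h; cases h
    · rintro ⟨r, hr, har, -⟩
      refine absurd ?_ hmem
      fin_cases hr <;> simp_all [ALL_PROTOCOLS]

-- the label/conflict part of the final state, as a function of initial label/conflict
-- and of the hit list H = filtered.filterMap get?
def cfPhi (lab : Option String) (c : Bool) (H : List String) : Option String × Bool :=
  match lab with
  | some l => (some l, c || H.any (fun x => x != l))
  | none =>
    match H with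
    | [] => (none, c)
    | h :: t => (some h, c || t.any (fun x => x != h))

theorem fold_char (apps : List String) : ∀ (k : Bool) (lab : Option String) (c : Bool),
    apps.foldl cfStep (k, lab, c) =
      (k || !(apps.filter (fun a => !(EXCLUDED_PROTOCOLS.contains a))).isEmpty,
       cfPhi lab c ((apps.filter (fun a => !(EXCLUDED_PROTOCOLS.contains a))).filterMap PROTO_TO_LABEL.get?)) := by
  induction apps with
  | nil => intro k lab c; cases lab <;> simp [cfPhi]
  | cons x xs ih =>
    intro k lab c
    simp only [List.foldl_cons, List.filter_cons]
    by_cases hx : x ∈ EXCLUDED_PROTOCOLS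
    · simp [cfStep, hx, ih]
    · cases hget : PROTO_TO_LABEL.get? x with
      | none => cases lab <;> simp [cfStep, hx, hget, ih, cfPhi]
      | some hit =>
        cases lab with
        | none => simp [cfStep, hx, hget, ih, cfPhi]
        | some l => simp [cfStep, hx, hget, ih, cfPhi, Bool.or_assoc]

-- ===== VERDICT (by name: the statement is the Claim_ definition above) =====
theorem classify_flow_spec : Claim_equal_classify_flow := by
  intro apps stem _
  show classify_flow apps stem = classify_flow_alt apps stem
  unfold classify_flow classify_flow_alt
  rw [fold_char]
  set F := apps.filter (fun a => !(EXCLUDED_PROTOCOLS.contains a)) with hFdef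
  set H := F.filterMap PROTO_TO_LABEL.get? with hHdef
  by_cases hF : F.isEmpty
  · simp [hF]
  · simp only [hF, if_false, Bool.not_false, Bool.false_or, Bool.not_true, Bool.false_eq_true]
    set matched := (EXPLICIT_APP_RULES.filter
      (fun r => !(PySem.Set.inter (PySem.Set.ofList F) r.2).isEmpty)).map Prod.fst with hMdef
    have hmem : ∀ l, l ∈ matched ↔ l ∈ H := by
      intro l
      rw [hHdef, List.mem_filterMap, hMdef]
      simp only [List.mem_map, List.mem_filter]
      constructor
      · rintro ⟨r, ⟨hr, hcond⟩, rfl⟩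
        rw [Bool.not_eq_true', List.isEmpty_eq_false_iff_exists_mem] at hcond
        obtain ⟨a, ha⟩ := hcond
        rw [PySem.Set.mem_inter] at ha
        obtain ⟨ha1, ha2⟩ := ha
        rw [PySem.Set.mem_ofList] at ha1
        exact ⟨a, ha1, (get?_proto a r.1).mpr ⟨r, hr, ha2, rfl⟩⟩
      · rintro ⟨a, haF, hg⟩
        obtain ⟨r, hr, har, rfl⟩ := (get?_proto a l).mp hg
        refine ⟨r, ⟨hr, ?_⟩, rfl⟩
        rw [Bool.not_eq_true', List.isEmpty_eq_false_iff_exists_mem]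
        refine ⟨a, ?_⟩
        rw [PySem.Set.mem_inter, PySem.Set.mem_ofList]
        exact ⟨haF, har⟩
    have hnodupM : matched.Nodup := by
      rw [hMdef]
      have hsub : (EXPLICIT_APP_RULES.filter
          (fun r => !(PySem.Set.inter (PySem.Set.ofList F) r.2).isEmpty)).Sublist
          EXPLICIT_APP_RULES := List.filter_sublist
      exact (hsub.map Prod.fst).nodup (by decide)
    cases hH : H with
    | nil =>
      have hM : matched = [] := by
        cases hMnil : matched with
        | nil => rfl
        | cons m ms =>
          exfalso
          have := (hmem m).mp (hMnil ▸ List.mem_cons_self)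
          rw [hH] at this; exact absurd this (List.not_mem_nil)
      simp [cfPhi, hM, byname_eq]
    | cons h t =>
      by_cases hc : t.any (fun x => x != h)
      · -- conflict: two distinct labels among hits, so matched.length ≠ 1
        obtain ⟨x, hxt, hxh⟩ := List.any_eq_true.mp hc
        rw [bne_iff_ne] at hxh
        have h1 : matched.length ≠ 1 := by
          intro hlen
          obtain ⟨m, hm⟩ := List.length_eq_one_iff.mp hlen
          have hhm : h = m := by
            have := (hmem h).mpr (hH ▸ List.mem_cons_self)
            rw [hm] at this; simpa using this
          have hxm : x = m := by
            have := (hmem x).mpr (hH ▸ List.mem_cons_of_mem _ hxt)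
            rw [hm] at this; simpa using this
          exact hxh (hxm ▸ hhm ▸ rfl)
        simp [cfPhi, hc, h1, byname_eq]
      · -- no conflict: all hits equal h, so matched = [h]
        have hall : ∀ x ∈ t, x = h := by
          intro x hx
          by_contra hne
          exact hc (List.any_eq_true.mpr ⟨x, hx, bne_iff_ne.mpr hne⟩)
        have hHsub : ∀ x ∈ H, x = h := by
          intro x hx
          rw [hH] at hx
          rcases List.mem_cons.mp hx with rfl | hx'
          · rfl
          · exact hall x hx'
        have hM : matched = [h] := by
          have hhmem : h ∈ matched := (hmem h).mpr (hH ▸ List.mem_cons_self)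
          cases hMc : matched with
          | nil => rw [hMc] at hhmem; exact absurd hhmem List.not_mem_nil
          | cons m ms =>
            rw [hMc] at hmem hnodupM hhmem
            have hmh : m = h := hHsub m ((hmem m).mp List.mem_cons_self)
            cases hmsc : ms with
            | nil => rw [hmh]
            | cons m2 ms2 =>
              exfalso
              rw [hmsc] at hmem hnodupM
              have hm2 : m2 = h := hHsub m2 ((hmem m2).mp (by simp))
              rw [hmh, hm2] at hnodupM
              simp at hnodupM
        simp [cfPhi, hc, hM, PySem.List.pyGet?, PySem.List.pyIdx?]
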